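-- pv_equiv track=rewrite | github.com/nuprl/MultiPL-T | multipl_e_target_adaptor/dirty_proc_python.py | proc_content
-- ===== SOURCE A (Python) =====
-- def proc_content(content):
--     lines = content.split("\n")
--     before = ""
--     body = ""
--     num_docstring = 0
--     for line in lines:
--         if num_docstring == 2:
--             body += line + "\n"
--         else:
--             before += line + "\n"
--         if '"""' in line and num_docstring < 2:
--             num_docstring += line.count('"""')
--
--     return before
-- ===== SOURCE B (Python) =====
-- def proc_content(content):
--     p1 = content.find('"""')
--     if p1 == -1:
--         return content + "\n"
--     p2 = content.find('"""', p1 + 3)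
--     if p2 == -1:
--         return content + "\n"
--     nl = content.find("\n", p2)
--     if nl == -1:
--         return content + "\n"
--     return content[:nl] + "\n"
-- ===== Notes on version B (the rewrite author's own statement) =====
-- stated objective: simpler
-- what changed: Replaced the line-splitting fold that accumulates three pieces of state (before/body/docstring counter) with three direct string searches: find the first and second '"""' markers and the next newline, then slice the content there.
-- intended difference: On inputs where the running count of '"""' occurrences jumps from below 2 to above 2 on a single non-final line (e.g. three markers on one line), A's 'num_docstring == 2' test never fires so A returns the entire content plus a newline, while B returns the content truncated after that line, which is the intended 'cut after the docstring closes' behaviour. — e.g. on proc_content("\"\"\"a\"\"\"b\"\"\"\nc"): A returns "\"\"\"a\"\"\"b\"\"\"\nc\n", B returns "\"\"\"a\"\"\"b\"\"\"\n"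
import Mathlib
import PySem

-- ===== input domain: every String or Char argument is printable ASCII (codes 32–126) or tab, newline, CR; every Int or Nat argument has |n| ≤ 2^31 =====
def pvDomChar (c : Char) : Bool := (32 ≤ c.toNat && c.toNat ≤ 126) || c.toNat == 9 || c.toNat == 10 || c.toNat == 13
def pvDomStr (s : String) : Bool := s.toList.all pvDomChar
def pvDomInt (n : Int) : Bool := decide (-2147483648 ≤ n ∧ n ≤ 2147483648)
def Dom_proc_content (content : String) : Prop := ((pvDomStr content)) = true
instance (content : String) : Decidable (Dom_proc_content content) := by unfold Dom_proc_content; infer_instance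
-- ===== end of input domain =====

-- B replaces A's line-splitting fold (before/body/counter state) with three direct
-- string searches and one slice (objective: simpler); on inputs where A's counter
-- jumps past 2 on one non-final line, A returns everything while B truncates (see D_).

-- ===== PORT A =====
def pvQ : List Char := ['\"', '\"', '\"']

def pvStepA (st : List Char × List Char × Int) (l : List Char) :
    List Char × List Char × Int :=
  let st2 : List Char × List Char × Int :=
    if st.2.2 = 2 then (st.1, st.2.1 ++ l ++ ['\n'], st.2.2)
    else (st.1 ++ l ++ ['\n'], st.2.1, st.2.2)
  let n' : Int :=
    if PySem.Chars.isIn pvQ l && decide (st2.2.2 < 2) then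
      st2.2.2 + (PySem.Chars.count l pvQ : Int)
    else st2.2.2
  (st2.1, st2.2.1, n')

def pvProcA (cs : List Char) : List Char :=
  ((PySem.Chars.splitOn cs ['\n']).foldl pvStepA ([], [], 0)).1

def proc_content (content : String) : String :=
  String.ofList (pvProcA content.toList)

-- ===== PORT B =====
def pvProcB (cs : List Char) : List Char :=
  let p1 := PySem.Chars.find cs pvQ
  if p1 = -1 then cs ++ ['\n']
  else
    let p2 := PySem.Chars.findFrom cs pvQ (p1 + 3) none
    if p2 = -1 then cs ++ ['\n']
    else
      let nl := PySem.Chars.findFrom cs ['\n'] p2 none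
      if nl = -1 then cs ++ ['\n']
      else PySem.Chars.slice cs none (some nl) ++ ['\n']

def proc_content_alt (content : String) : String :=
  String.ofList (pvProcB content.toList)

-- ===== PRECONDITION & SPEC =====
-- On inputs where the running count of '"""' occurrences jumps from below 2 to above 2 on a
-- single non-final line, A's 'num_docstring == 2' test never fires so A returns the whole
-- content plus '\n', while B truncates after that line — the intended behaviour.
def D_proc_content (content : String) : Prop :=
  let ls := PySem.Chars.splitOn content.toList ['\n']
  let f := fun i => ((ls.take i).map (PySem.Chars.count · ['\"', '\"', '\"'])).sum
  ∃ i < ls.length - 1, f i < 2 ∧ 2 < f (i + 1)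

instance (content : String) : Decidable (D_proc_content content) := by
  unfold D_proc_content; infer_instance

def Spec_proc_content (content : String) (out : String) : Prop :=
  ¬ D_proc_content content → out = proc_content_alt content
instance (content : String) (out : String) : Decidable (Spec_proc_content content out) := by
  unfold Spec_proc_content; infer_instance

def pvDiffWitness_proc_content : String := "\"\"\"a\"\"\"b\"\"\"\nc"
def pvDiffWitnessOut_proc_content : String × String :=
  ("\"\"\"a\"\"\"b\"\"\"\nc\n", "\"\"\"a\"\"\"b\"\"\"\n")

-- ===== CLAIM (what is proved, stated in full; the proofs are below) =====
def Claim_unchanged_proc_content : Prop :=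
  ∀ (content : String), Dom_proc_content content → Spec_proc_content content (proc_content content)
def Claim_changed_proc_content : Prop :=
  Dom_proc_content (pvDiffWitness_proc_content) ∧ D_proc_content (pvDiffWitness_proc_content) ∧
  proc_content (pvDiffWitness_proc_content) = pvDiffWitnessOut_proc_content.1 ∧
  proc_content_alt (pvDiffWitness_proc_content) = pvDiffWitnessOut_proc_content.2 ∧
  pvDiffWitnessOut_proc_content.1 ≠ pvDiffWitnessOut_proc_content.2
def Claim_exact_proc_content : Prop :=
  ∀ (content : String), Dom_proc_content content → D_proc_content content →
    proc_content content ≠ proc_content_alt content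

-- ===== LEMMAS AND PROOFS =====

-- model of A's loop: the 'before' accumulator as a function of the remaining lines and counter
def pvA : List (List Char) → Int → List Char
  | [], _ => []
  | l :: ls, n =>
    let n' : Int :=
      if PySem.Chars.isIn pvQ l && decide (n < 2) then n + (PySem.Chars.count l pvQ : Int)
      else n
    if n = 2 then pvA ls n' else l ++ '\n' :: pvA ls n'

-- model of B generalized to "still need 2 - n occurrences" (n = 0 or 1)
def pvPos (cs : List Char) (n : Int) : Int :=
  if n = 1 then PySem.Chars.find cs pvQ
  else if PySem.Chars.find cs pvQ = -1 then -1
  else PySem.Chars.findFrom cs pvQ (PySem.Chars.find cs pvQ + 3) none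

def pvB (cs : List Char) (n : Int) : List Char :=
  if pvPos cs n = -1 then cs ++ ['\n']
  else if PySem.Chars.findFrom cs ['\n'] (pvPos cs n) none = -1 then cs ++ ['\n']
  else cs.take (PySem.Chars.findFrom cs ['\n'] (pvPos cs n) none).toNat ++ ['\n']

-- the difference region, as a recursion over the lines with running counter n
def pvDm : List (List Char) → Int → Prop
  | [], _ => False
  | l :: ls, n =>
    if 2 ≤ n + (PySem.Chars.count l pvQ : Int) then
      2 < n + (PySem.Chars.count l pvQ : Int) ∧ ls ≠ []
    else pvDm ls (n + (PySem.Chars.count l pvQ : Int))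

-- structural counter for greedy non-overlapping occurrences of pvQ
def pvMCnt : List Char → Nat
  | [] => 0
  | c :: t => if pvQ.isPrefixOf (c :: t) then 1 + pvMCnt (t.drop 2) else pvMCnt t
termination_by l => l.length
decreasing_by
  · simp only [List.length_drop, List.length_cons]; omega
  · simp

theorem pv_sgo_step_nl (fuel : Nat) (t cur : List Char) (acc : List (List Char)) :
    PySem.Chars.splitOn.go ['\n'] (fuel + 1) ('\n' :: t) cur acc =
      PySem.Chars.splitOn.go ['\n'] fuel t [] (cur.reverse :: acc) := by
  simp [PySem.Chars.splitOn.go, List.isPrefixOf]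

theorem pv_sgo_step_ne (fuel : Nat) (c : Char) (t cur : List Char) (acc : List (List Char))
    (hc : c ≠ '\n') :
    PySem.Chars.splitOn.go ['\n'] (fuel + 1) (c :: t) cur acc =
      PySem.Chars.splitOn.go ['\n'] fuel t (c :: cur) acc := by
  simp [PySem.Chars.splitOn.go, List.isPrefixOf, Ne.symm hc]

theorem pv_sgoAcc (fuel : Nat) : ∀ (l cur : List Char) (acc : List (List Char)),
    PySem.Chars.splitOn.go ['\n'] fuel l cur acc =
      acc.reverse ++ PySem.Chars.splitOn.go ['\n'] fuel l cur [] := by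
  induction fuel with
  | zero => intro l cur acc; simp [PySem.Chars.splitOn.go]
  | succ f ih =>
    intro l cur acc
    cases l with
    | nil => simp [PySem.Chars.splitOn.go]
    | cons c t =>
      by_cases hp : c = '\n'
      · subst hp
        rw [pv_sgo_step_nl f t cur acc, pv_sgo_step_nl f t cur []]
        rw [ih _ _ (cur.reverse :: acc), ih _ _ (cur.reverse :: [])]
        simp
      · rw [pv_sgo_step_ne f c t cur acc hp, pv_sgo_step_ne f c t cur [] hp]
        rw [ih _ _ acc]

theorem pv_sgoB (l : List Char) (h : '\n' ∉ l) : ∀ (fuel : Nat) (cur : List Char)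
    (acc : List (List Char)),
    PySem.Chars.splitOn.go ['\n'] (fuel + l.length) l cur acc =
      ((cur.reverse ++ l) :: acc).reverse := by
  induction l with
  | nil => intro fuel cur acc; cases fuel <;> simp [PySem.Chars.splitOn.go]
  | cons c t ih =>
    intro fuel cur acc
    have hc : c ≠ '\n' := fun e => h (by simp [e])
    have ht : '\n' ∉ t := fun m => h (List.mem_cons_of_mem _ m)
    show PySem.Chars.splitOn.go ['\n'] ((fuel + t.length) + 1) (c :: t) cur acc = _
    rw [pv_sgo_step_ne (fuel + t.length) c t cur acc hc, ih ht fuel (c :: cur) acc]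
    simp

theorem pv_sgoA (l rest : List Char) (h : '\n' ∉ l) : ∀ (fuel : Nat) (cur : List Char)
    (acc : List (List Char)),
    PySem.Chars.splitOn.go ['\n'] (fuel + l.length + 1) (l ++ '\n' :: rest) cur acc =
      PySem.Chars.splitOn.go ['\n'] fuel rest [] ((cur.reverse ++ l) :: acc) := by
  induction l with
  | nil =>
    intro fuel cur acc
    simp only [List.nil_append, List.length_nil, Nat.add_zero]
    rw [pv_sgo_step_nl fuel rest cur acc]
    simp
  | cons c t ih =>
    intro fuel cur acc
    have hc : c ≠ '\n' := fun e => h (by simp [e])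
    have ht : '\n' ∉ t := fun m => h (List.mem_cons_of_mem _ m)
    show PySem.Chars.splitOn.go ['\n'] ((fuel + t.length + 1) + 1) (c :: (t ++ '\n' :: rest)) cur acc = _
    rw [pv_sgo_step_ne (fuel + t.length + 1) c (t ++ '\n' :: rest) cur acc hc]
    rw [ih ht fuel (c :: cur) acc]
    simp

theorem pv_splitOn_single (x : List Char) (h : '\n' ∉ x) :
    PySem.Chars.splitOn x ['\n'] = [x] := by
  unfold PySem.Chars.splitOn
  rw [Nat.add_comm x.length 1, Nat.add_comm 1 x.length]
  rw [show x.length + 1 = 1 + x.length from Nat.add_comm _ _]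
  rw [pv_sgoB x h 1 [] []]
  simp

theorem pv_splitOn_cons (l rest : List Char) (h : '\n' ∉ l) :
    PySem.Chars.splitOn (l ++ '\n' :: rest) ['\n'] = l :: PySem.Chars.splitOn rest ['\n'] := by
  unfold PySem.Chars.splitOn
  rw [show (l ++ '\n' :: rest).length + 1 = (rest.length + 1) + l.length + 1 by
    simp [List.length_append]; omega]
  rw [pv_sgoA l rest h (rest.length + 1) [] []]
  rw [pv_sgoAcc (rest.length + 1) rest [] [List.reverse [] ++ l]]
  simp

theorem pv_split_at_nl (cs : List Char) (h : '\n' ∈ cs) :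
    ∃ l rest, cs = l ++ '\n' :: rest ∧ '\n' ∉ l := by
  induction cs with
  | nil => simp at h
  | cons c t ih =>
    by_cases hc : c = '\n'
    · exact ⟨[], t, by simp [hc], by simp⟩
    · have ht : '\n' ∈ t := by
        rcases List.mem_cons.mp h with h1 | h1
        · exact absurd h1.symm hc
        · exact h1
      obtain ⟨l, rest, he, hn⟩ := ih ht
      exact ⟨c :: l, rest, by simp [he], by
        intro m
        rcases List.mem_cons.mp m with h1 | h1
        · exact hc h1.symm
        · exact hn h1⟩

theorem pv_splitOn_ne_nil (cs : List Char) : PySem.Chars.splitOn cs ['\n'] ≠ [] := by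
  by_cases h : '\n' ∈ cs
  · obtain ⟨l, rest, he, hn⟩ := pv_split_at_nl cs h
    rw [he, pv_splitOn_cons l rest hn]; simp
  · rw [pv_splitOn_single cs h]; simp

theorem pv_foldA (ls : List (List Char)) : ∀ (b d : List Char) (n : Int),
    (ls.foldl pvStepA (b, d, n)).1 = b ++ pvA ls n := by
  induction ls with
  | nil => intro b d n; simp [pvA]
  | cons l ls ih =>
    intro b d n
    simp only [List.foldl_cons]
    by_cases h2 : n = 2
    · subst h2
      have hstep : pvStepA (b, d, 2) l = (b, d ++ l ++ ['\n'], 2) := by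
        simp [pvStepA]
      rw [hstep, ih]
      simp [pvA]
    · have hstep : pvStepA (b, d, n) l = (b ++ l ++ ['\n'], d,
          if PySem.Chars.isIn pvQ l && decide (n < 2) then n + (PySem.Chars.count l pvQ : Int)
          else n) := by
        simp [pvStepA, h2]
      rw [hstep, ih]
      simp [pvA, h2]

theorem pv_find_nil (sub : List Char) (hs : sub ≠ []) : PySem.Chars.find [] sub = -1 := by
  simp [PySem.Chars.find, PySem.Chars.find.go, List.isEmpty_iff, hs]

theorem pv_findgo_shift (sub : List Char) (h : sub ≠ []) : ∀ (l : List Char) (k : Nat),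
    PySem.Chars.find.go sub l k =
      if PySem.Chars.find l sub = -1 then -1 else (k : Int) + PySem.Chars.find l sub := by
  intro l
  induction l with
  | nil =>
    intro k
    rw [pv_find_nil sub h]
    simp [PySem.Chars.find.go, List.isEmpty_iff, h]
  | cons c t ih =>
    intro k
    by_cases hp : sub.isPrefixOf (c :: t)
    · simp [PySem.Chars.find, PySem.Chars.find.go, hp]
    · have l1 : PySem.Chars.find.go sub (c :: t) k = PySem.Chars.find.go sub t (k + 1) := by
        simp [PySem.Chars.find.go, hp]
      have l0 : PySem.Chars.find (c :: t) sub = PySem.Chars.find.go sub t 1 := by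
        simp [PySem.Chars.find, PySem.Chars.find.go, hp]
      rw [l1, l0, ih (k + 1), ih 1]
      have hle := PySem.Chars.neg_one_le_find (s := t) (sub := sub)
      split_ifs with hf <;> push_cast <;> omega

theorem pv_find_cons (sub : List Char) (hs : sub ≠ []) (c : Char) (t : List Char) :
    PySem.Chars.find (c :: t) sub =
      if sub.isPrefixOf (c :: t) then 0
      else (if PySem.Chars.find t sub = -1 then -1 else 1 + PySem.Chars.find t sub) := by
  by_cases hp : sub.isPrefixOf (c :: t)
  · simp [PySem.Chars.find, PySem.Chars.find.go, hp]
  · have l0 : PySem.Chars.find (c :: t) sub = PySem.Chars.find.go sub t 1 := by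
      simp [PySem.Chars.find, PySem.Chars.find.go, hp]
    rw [l0, pv_findgo_shift sub hs t 1]
    simp [hp]

theorem pv_prefix_nl (sub x y : List Char) (h : '\n' ∉ sub) :
    sub.isPrefixOf (x ++ '\n' :: y) = sub.isPrefixOf x := by
  induction sub generalizing x with
  | nil => simp [List.isPrefixOf]
  | cons s sub' ih =>
    have hs : s ≠ '\n' := fun e => h (by simp [e])
    have hsub' : '\n' ∉ sub' := fun m => h (List.mem_cons_of_mem _ m)
    cases x with
    | nil => simp [List.isPrefixOf, hs]
    | cons a x' => simp [List.isPrefixOf, ih x' hsub']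

theorem pv_find_append (sub l rest : List Char) (hs : sub ≠ []) (hnl : '\n' ∉ sub) :
    PySem.Chars.find (l ++ '\n' :: rest) sub =
      if PySem.Chars.find l sub = -1 then
        (if PySem.Chars.find rest sub = -1 then -1
         else (l.length : Int) + 1 + PySem.Chars.find rest sub)
      else PySem.Chars.find l sub := by
  induction l with
  | nil =>
    have hh : sub.isPrefixOf ('\n' :: rest) = false := by
      cases sub with
      | nil => exact absurd rfl hs
      | cons s sub' =>
        have hsnl : s ≠ '\n' := fun e => hnl (by simp [e])
        simp [List.isPrefixOf, hsnl]
    rw [List.nil_append, pv_find_cons sub hs '\n' rest, hh]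
    rw [pv_find_nil sub hs]
    simp
  | cons c l' ih =>
    have hpre : sub.isPrefixOf (c :: l' ++ '\n' :: rest) = sub.isPrefixOf (c :: l') := by
      rw [show c :: l' ++ '\n' :: rest = (c :: l') ++ '\n' :: rest from rfl]
      exact pv_prefix_nl sub (c :: l') rest hnl
    rw [show (c :: l') ++ '\n' :: rest = c :: (l' ++ '\n' :: rest) from rfl]
    rw [pv_find_cons sub hs c (l' ++ '\n' :: rest), pv_find_cons sub hs c l']
    rw [show c :: (l' ++ '\n' :: rest) = c :: l' ++ '\n' :: rest from rfl, hpre]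
    by_cases hp : sub.isPrefixOf (c :: l')
    · simp [hp]
    · rw [if_neg hp, if_neg hp, ih]
      simp only [List.length_cons]
      have h1 := PySem.Chars.neg_one_le_find (s := l') (sub := sub)
      have h2 := PySem.Chars.neg_one_le_find (s := rest) (sub := sub)
      split_ifs <;> push_cast <;> omega

theorem pv_find_no_nl (x : List Char) (h : '\n' ∉ x) :
    PySem.Chars.find x ['\n'] = -1 := by
  rw [PySem.Chars.find_eq_neg_one_iff]
  intro hinf
  exact h (hinf.subset (by simp))

theorem pv_find_nl_concat (x y : List Char) (h : '\n' ∉ x) :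
    PySem.Chars.find (x ++ '\n' :: y) ['\n'] = (x.length : Int) := by
  induction x with
  | nil => simp [PySem.Chars.find, PySem.Chars.find.go, List.isPrefixOf]
  | cons c x' ih =>
    have hc : c ≠ '\n' := fun e => h (by simp [e])
    have hx' : '\n' ∉ x' := fun m => h (List.mem_cons_of_mem _ m)
    rw [show (c :: x') ++ '\n' :: y = c :: (x' ++ '\n' :: y) from rfl]
    rw [pv_find_cons ['\n'] (by simp) c _, ih hx']
    have hp : ¬ List.isPrefixOf ['\n'] (c :: (x' ++ '\n' :: y)) = true := by
      simp [List.isPrefixOf, hc.symm]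
    rw [if_neg hp, if_neg (show ¬((x'.length : Int) = -1) by omega)]
    simp only [List.length_cons]
    push_cast
    omega

theorem pvMCnt_nil : pvMCnt [] = 0 := by rw [pvMCnt]

theorem pvMCnt_cons (c : Char) (t : List Char) :
    pvMCnt (c :: t) = if pvQ.isPrefixOf (c :: t) then 1 + pvMCnt (t.drop 2) else pvMCnt t := by
  rw [pvMCnt]

theorem pv_countgo : ∀ (fuel : Nat) (l : List Char) (acc : Nat), l.length ≤ fuel →
    PySem.Chars.count.go pvQ fuel l acc = acc + pvMCnt l := by
  intro fuel
  induction fuel with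
  | zero =>
    intro l acc hf
    have hl : l = [] := by
      cases l with
      | nil => rfl
      | cons a b => simp at hf
    subst hl
    simp [PySem.Chars.count.go, pvMCnt_nil]
  | succ f ih =>
    intro l acc hf
    cases l with
    | nil => simp [PySem.Chars.count.go, pvMCnt_nil]
    | cons c t =>
      by_cases hp : pvQ.isPrefixOf (c :: t)
      · have hdrop : List.drop pvQ.length (c :: t) = t.drop 2 := by
          simp [pvQ]
        simp only [PySem.Chars.count.go, hp, if_true, hdrop]
        rw [ih (t.drop 2) (acc + 1) (by simp at hf ⊢; omega)]
        rw [pvMCnt_cons, if_pos hp]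
        omega
      · simp only [PySem.Chars.count.go, hp]
        rw [ih t acc (by simp at hf; omega)]
        rw [pvMCnt_cons, if_neg hp]
        simp

theorem pv_count_eq_mcnt (l : List Char) : PySem.Chars.count l pvQ = pvMCnt l := by
  unfold PySem.Chars.count
  rw [show pvQ.isEmpty = false from by simp [pvQ]]
  simp only [Bool.false_eq_true, if_false]
  rw [pv_countgo l.length l 0 (Nat.le_refl _)]
  omega

theorem pv_mcnt_zero_iff (l : List Char) : pvMCnt l = 0 ↔ PySem.Chars.find l pvQ = -1 := by
  induction l using pvMCnt.induct with
  | case1 => simp [pvMCnt_nil, pv_find_nil pvQ (by simp [pvQ])]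
  | case2 c t hp ih =>
    rw [pv_find_cons pvQ (by simp [pvQ]) c t]
    rw [pvMCnt_cons, if_pos hp]
    simp [hp]
  | case3 c t hp ih =>
    rw [pv_find_cons pvQ (by simp [pvQ]) c t]
    rw [pvMCnt_cons, if_neg hp, if_neg hp]
    rw [ih]
    have h1 := PySem.Chars.neg_one_le_find (s := t) (sub := pvQ)
    split_ifs with hf
    · simp [hf]
    · constructor
      · intro h; exact absurd h hf
      · intro h; omega

theorem pv_mcnt_succ (l : List Char) : ∀ (p : Nat), PySem.Chars.find l pvQ = (p : Int) →
    pvMCnt l = 1 + pvMCnt (l.drop (p + 3)) := by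
  induction l using pvMCnt.induct with
  | case1 =>
    intro p h
    rw [pv_find_nil pvQ (by simp [pvQ])] at h
    omega
  | case2 c t hp ih =>
    intro p h
    rw [pv_find_cons pvQ (by simp [pvQ]) c t] at h
    rw [if_pos hp] at h
    have hp0 : p = 0 := by omega
    subst hp0
    rw [pvMCnt_cons, if_pos hp]
    simp
  | case3 c t hp ih =>
    intro p h
    rw [pv_find_cons pvQ (by simp [pvQ]) c t] at h
    rw [if_neg hp] at h
    have h1 := PySem.Chars.neg_one_le_find (s := t) (sub := pvQ)
    by_cases hf : PySem.Chars.find t pvQ = -1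
    · exfalso; rw [if_pos hf] at h; omega
    · rw [if_neg hf] at h
      have hp1 : 1 ≤ p := by omega
      have hft : PySem.Chars.find t pvQ = ((p - 1 : Nat) : Int) := by omega
      have := ih (p - 1) hft
      rw [pvMCnt_cons, if_neg hp, this]
      congr 2
      rw [show p + 3 = (p - 1 + 3) + 1 from by omega]
      simp

theorem pv_find_add_len_le (l sub : List Char) (h : 0 ≤ PySem.Chars.find l sub) :
    PySem.Chars.find l sub + sub.length ≤ l.length := by
  obtain ⟨hpre, -⟩ := PySem.Chars.find_spec (s := l) (sub := sub) h
  have hl := hpre.length_le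
  simp only [List.length_drop] at hl
  have h2 := PySem.Chars.find_le_length (s := l) (sub := sub)
  omega

theorem pv_findFrom_eq (l sub : List Char) (st : Int) (h0 : 0 ≤ st) (hl : st ≤ l.length) :
    PySem.Chars.findFrom l sub st none =
      if PySem.Chars.find (l.drop st.toNat) sub = -1 then -1
      else st + PySem.Chars.find (l.drop st.toNat) sub := by
  have hk : st = ((st.toNat : Nat) : Int) := (Int.toNat_of_nonneg h0).symm
  rw [hk]
  exact PySem.Chars.findFrom_natCast l sub st.toNat (by omega)

theorem pv_A_two (ls : List (List Char)) : pvA ls 2 = [] := by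
  induction ls with
  | nil => simp [pvA]
  | cons l ls ih => simp [pvA, ih]

theorem pv_A_big_aux : ∀ (k : Nat) (cs : List Char) (n : Int), cs.length ≤ k →
    ¬ (n < 2) → n ≠ 2 → pvA (PySem.Chars.splitOn cs ['\n']) n = cs ++ ['\n'] := by
  intro k
  induction k with
  | zero =>
    intro cs n hk h1 h2
    have hcs : cs = [] := by
      cases cs with
      | nil => rfl
      | cons a b => simp at hk
    subst hcs
    rw [pv_splitOn_single [] (by simp)]
    simp [pvA, h2]
  | succ k ih =>
    intro cs n hk h1 h2
    by_cases hm : '\n' ∈ cs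
    · obtain ⟨l, rest, he, hn⟩ := pv_split_at_nl cs hm
      subst he
      rw [pv_splitOn_cons l rest hn]
      have hrest : rest.length ≤ k := by
        simp [List.length_append] at hk; omega
      simp only [pvA, decide_eq_false h1, Bool.and_false, Bool.false_eq_true, if_false,
        if_neg h2]
      rw [ih rest n hrest h1 h2]
      simp
    · rw [pv_splitOn_single cs hm]
      simp [pvA, h2]

theorem pv_A_big (cs : List Char) (n : Int) (h : 3 ≤ n) :
    pvA (PySem.Chars.splitOn cs ['\n']) n = cs ++ ['\n'] :=
  pv_A_big_aux cs.length cs n (Nat.le_refl _) (by omega) (by omega)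

theorem pvPos_spec (cs : List Char) (n : Int) (h : pvPos cs n ≠ -1) :
    0 ≤ pvPos cs n ∧ pvPos cs n + 3 ≤ cs.length := by
  unfold pvPos at h ⊢
  by_cases hn : n = 1
  · rw [if_pos hn] at h ⊢
    have h0 := PySem.Chars.neg_one_le_find (s := cs) (sub := pvQ)
    have h3 := pv_find_add_len_le cs pvQ (by omega)
    rw [show pvQ.length = 3 from rfl] at h3
    omega
  · rw [if_neg hn] at h ⊢
    by_cases h1 : PySem.Chars.find cs pvQ = -1
    · rw [if_pos h1] at h; exact absurd rfl h
    · rw [if_neg h1] at h ⊢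
      have h0 := PySem.Chars.neg_one_le_find (s := cs) (sub := pvQ)
      have h3 := pv_find_add_len_le cs pvQ (by omega)
      rw [show pvQ.length = 3 from rfl] at h3
      rw [pv_findFrom_eq cs pvQ (PySem.Chars.find cs pvQ + 3) (by omega) (by omega)] at h ⊢
      by_cases h4 : PySem.Chars.find (cs.drop (PySem.Chars.find cs pvQ + 3).toNat) pvQ = -1
      · rw [if_pos h4] at h; exact absurd rfl h
      · have h5 := PySem.Chars.neg_one_le_find
          (s := cs.drop (PySem.Chars.find cs pvQ + 3).toNat) (sub := pvQ)
        have h6 := pv_find_add_len_le (cs.drop (PySem.Chars.find cs pvQ + 3).toNat) pvQ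
          (by omega)
        simp only [List.length_drop] at h6
        rw [show pvQ.length = 3 from rfl] at h6
        rw [if_neg h4]
        omega

theorem pv_q_ne_nil : pvQ ≠ [] := by simp [pvQ]

theorem pv_nl_not_in_q : '\n' ∉ pvQ := by simp [pvQ]

theorem pv_j_inline (l rest : List Char) (hl : '\n' ∉ l) (p : Int) (h0 : 0 ≤ p)
    (hp : p ≤ l.length) :
    PySem.Chars.findFrom (l ++ '\n' :: rest) ['\n'] p none = (l.length : Int) := by
  rw [pv_findFrom_eq _ _ p h0 (by simp [List.length_append]; omega)]
  rw [List.drop_append_of_le_length (by omega : p.toNat ≤ l.length)]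
  rw [pv_find_nl_concat (l.drop p.toNat) rest (fun m => hl (List.drop_subset _ _ m))]
  rw [if_neg (by omega : ¬(((l.drop p.toNat).length : Int) = -1))]
  simp only [List.length_drop]
  omega

theorem pv_findFrom_shift (l rest sub : List Char) (x : Int) (h0 : 0 ≤ x)
    (hx : x ≤ rest.length) :
    PySem.Chars.findFrom (l ++ '\n' :: rest) sub ((l.length : Int) + 1 + x) none =
      if PySem.Chars.find (rest.drop x.toNat) sub = -1 then -1
      else (l.length : Int) + 1 + x + PySem.Chars.find (rest.drop x.toNat) sub := by
  rw [pv_findFrom_eq _ _ _ (by omega) (by simp [List.length_append]; omega)]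
  have hdrop : (l ++ '\n' :: rest).drop ((l.length : Int) + 1 + x).toNat = rest.drop x.toNat := by
    rw [show l ++ '\n' :: rest = (l ++ ['\n']) ++ rest from by simp]
    rw [show ((l.length : Int) + 1 + x).toNat = (l ++ ['\n']).length + x.toNat from by
      simp [List.length_append]; omega]
    exact List.drop_length_add_append x.toNat
  rw [hdrop]

theorem pv_B_cons (l rest : List Char) (hl : '\n' ∉ l) (n n' : Int)
    (hpos : pvPos (l ++ '\n' :: rest) n =
      (if pvPos rest n' = -1 then -1 else (l.length : Int) + 1 + pvPos rest n')) :
    pvB (l ++ '\n' :: rest) n = l ++ '\n' :: pvB rest n' := by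
  unfold pvB
  rw [hpos]
  by_cases hq : pvPos rest n' = -1
  · rw [if_pos hq, if_pos rfl, if_pos hq]
    simp
  · rw [if_neg hq]
    obtain ⟨hq0, hq3⟩ := pvPos_spec rest n' hq
    rw [if_neg (by omega : ¬((l.length : Int) + 1 + pvPos rest n' = -1))]
    rw [pv_findFrom_shift l rest ['\n'] (pvPos rest n') hq0 (by omega)]
    rw [pv_findFrom_eq rest ['\n'] (pvPos rest n') hq0 (by omega)]
    by_cases hj : PySem.Chars.find (rest.drop (pvPos rest n').toNat) ['\n'] = -1
    · rw [if_pos hj, if_pos rfl, if_pos hj, if_pos rfl]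
      simp
    · have hjr := PySem.Chars.neg_one_le_find (s := rest.drop (pvPos rest n').toNat)
        (sub := ['\n'])
      have hne1 : ¬(pvPos rest n' +
          PySem.Chars.find (rest.drop (pvPos rest n').toNat) ['\n'] = -1) := by omega
      have hne2 : ¬((l.length : Int) + 1 + pvPos rest n' +
          PySem.Chars.find (rest.drop (pvPos rest n').toNat) ['\n'] = -1) := by omega
      simp only [if_neg hj, if_neg hq, if_neg hne1, if_neg hne2]
      rw [show ((l.length : Int) + 1 + pvPos rest n' +
          PySem.Chars.find (rest.drop (pvPos rest n').toNat) ['\n']).toNat =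
          (l ++ ['\n']).length + (pvPos rest n' +
            PySem.Chars.find (rest.drop (pvPos rest n').toNat) ['\n']).toNat from by
        simp [List.length_append]; omega]
      rw [show l ++ '\n' :: rest = (l ++ ['\n']) ++ rest from by simp]
      rw [List.take_length_add_append]
      simp

theorem pv_B_hit (l rest : List Char) (hl : '\n' ∉ l) (n : Int)
    (h0 : 0 ≤ pvPos (l ++ '\n' :: rest) n) (hle : pvPos (l ++ '\n' :: rest) n ≤ l.length) :
    pvB (l ++ '\n' :: rest) n = l ++ ['\n'] := by
  unfold pvB
  rw [if_neg (by omega : ¬(pvPos (l ++ '\n' :: rest) n = -1))]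
  rw [pv_j_inline l rest hl _ h0 hle]
  rw [if_neg (by omega : ¬((l.length : Int) = -1))]
  rw [show ((l.length : Int)).toNat = l.length from by omega]
  rw [show l ++ '\n' :: rest = (l ++ ['\n']) ++ rest from by simp,
    show l.length = (l ++ ['\n']).length + 0 - 1 from by simp]
  rw [show (l ++ ['\n']).length + 0 - 1 = l.length from by simp]
  rw [List.take_append_of_le_length (by simp [List.length_append])]
  simp

theorem pv_pos_hit1 (l rest : List Char) (hl : '\n' ∉ l)
    (hp : PySem.Chars.find l pvQ ≠ -1) :
    pvPos (l ++ '\n' :: rest) 1 = PySem.Chars.find l pvQ := by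
  unfold pvPos
  rw [if_pos rfl, pv_find_append pvQ l rest pv_q_ne_nil pv_nl_not_in_q, if_neg hp]

theorem pv_pos_rec1 (l rest : List Char) (hl : '\n' ∉ l)
    (hfl : PySem.Chars.find l pvQ = -1) :
    pvPos (l ++ '\n' :: rest) 1 =
      (if pvPos rest 1 = -1 then -1 else (l.length : Int) + 1 + pvPos rest 1) := by
  unfold pvPos
  rw [if_pos rfl, if_pos rfl, pv_find_append pvQ l rest pv_q_ne_nil pv_nl_not_in_q,
    if_pos hfl]

theorem pv_pos_rec0a (l rest : List Char) (hl : '\n' ∉ l)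
    (hfl : PySem.Chars.find l pvQ = -1) :
    pvPos (l ++ '\n' :: rest) 0 =
      (if pvPos rest 0 = -1 then -1 else (l.length : Int) + 1 + pvPos rest 0) := by
  unfold pvPos
  rw [if_neg (by omega : ¬((0 : Int) = 1)), if_neg (by omega : ¬((0 : Int) = 1))]
  rw [pv_find_append pvQ l rest pv_q_ne_nil pv_nl_not_in_q, if_pos hfl]
  by_cases hr : PySem.Chars.find rest pvQ = -1
  · simp [hr]
  · rw [if_neg hr]
    have hr0 := PySem.Chars.neg_one_le_find (s := rest) (sub := pvQ)
    have hr3 := pv_find_add_len_le rest pvQ (by omega)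
    rw [show pvQ.length = 3 from rfl] at hr3
    rw [if_neg (by omega : ¬((l.length : Int) + 1 + PySem.Chars.find rest pvQ = -1))]
    rw [show (l.length : Int) + 1 + PySem.Chars.find rest pvQ + 3 =
      (l.length : Int) + 1 + (PySem.Chars.find rest pvQ + 3) from by ring]
    rw [pv_findFrom_shift l rest pvQ (PySem.Chars.find rest pvQ + 3) (by omega) (by omega)]
    rw [pv_findFrom_eq rest pvQ (PySem.Chars.find rest pvQ + 3) (by omega) (by omega)]
    by_cases h2 : PySem.Chars.find (rest.drop (PySem.Chars.find rest pvQ + 3).toNat) pvQ = -1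
    · simp [h2, hr]
    · rw [if_neg h2, if_neg h2]
      have h20 := PySem.Chars.neg_one_le_find
        (s := rest.drop (PySem.Chars.find rest pvQ + 3).toNat) (sub := pvQ)
      simp only [if_neg hr]
      rw [if_neg (by omega : ¬(PySem.Chars.find rest pvQ + 3 +
        PySem.Chars.find (List.drop (PySem.Chars.find rest pvQ + 3).toNat rest) pvQ = -1))]
      ring

theorem pv_pos_rec0b (l rest : List Char) (hl : '\n' ∉ l)
    (hp : PySem.Chars.find l pvQ ≠ -1)
    (hr : PySem.Chars.find (l.drop (PySem.Chars.find l pvQ + 3).toNat) pvQ = -1) :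
    pvPos (l ++ '\n' :: rest) 0 =
      (if pvPos rest 1 = -1 then -1 else (l.length : Int) + 1 + pvPos rest 1) := by
  have hp0 := PySem.Chars.neg_one_le_find (s := l) (sub := pvQ)
  have hp3 := pv_find_add_len_le l pvQ (by omega)
  rw [show pvQ.length = 3 from rfl] at hp3
  unfold pvPos
  rw [if_neg (by omega : ¬((0 : Int) = 1)), if_pos rfl]
  rw [pv_find_append pvQ l rest pv_q_ne_nil pv_nl_not_in_q, if_neg hp]
  rw [if_neg hp]
  rw [pv_findFrom_eq _ pvQ (PySem.Chars.find l pvQ + 3) (by omega)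
    (by simp [List.length_append]; omega)]
  rw [List.drop_append_of_le_length (by omega : (PySem.Chars.find l pvQ + 3).toNat ≤ l.length)]
  rw [pv_find_append pvQ _ rest pv_q_ne_nil pv_nl_not_in_q, if_pos hr]
  by_cases hfr : PySem.Chars.find rest pvQ = -1
  · simp [hfr]
  · rw [if_neg hfr]
    have hfr0 := PySem.Chars.neg_one_le_find (s := rest) (sub := pvQ)
    simp only [List.length_drop]
    rw [if_neg (by omega : ¬(((l.length - (PySem.Chars.find l pvQ + 3).toNat : Nat) : Int) + 1 +
      PySem.Chars.find rest pvQ = -1))]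
    rw [if_neg hfr]
    omega

theorem pv_pos_hit0 (l rest : List Char) (hl : '\n' ∉ l)
    (hp : PySem.Chars.find l pvQ ≠ -1)
    (hr : PySem.Chars.find (l.drop (PySem.Chars.find l pvQ + 3).toNat) pvQ ≠ -1) :
    0 ≤ pvPos (l ++ '\n' :: rest) 0 ∧ pvPos (l ++ '\n' :: rest) 0 ≤ l.length := by
  have hp0 := PySem.Chars.neg_one_le_find (s := l) (sub := pvQ)
  have hp3 := pv_find_add_len_le l pvQ (by omega)
  rw [show pvQ.length = 3 from rfl] at hp3
  have hr0 := PySem.Chars.neg_one_le_find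
    (s := l.drop (PySem.Chars.find l pvQ + 3).toNat) (sub := pvQ)
  have hr3 := pv_find_add_len_le (l.drop (PySem.Chars.find l pvQ + 3).toNat) pvQ (by omega)
  rw [show pvQ.length = 3 from rfl] at hr3
  simp only [List.length_drop] at hr3
  unfold pvPos
  rw [if_neg (by omega : ¬((0 : Int) = 1))]
  rw [pv_find_append pvQ l rest pv_q_ne_nil pv_nl_not_in_q, if_neg hp]
  rw [if_neg hp]
  rw [pv_findFrom_eq _ pvQ (PySem.Chars.find l pvQ + 3) (by omega)
    (by simp [List.length_append]; omega)]
  rw [List.drop_append_of_le_length (by omega : (PySem.Chars.find l pvQ + 3).toNat ≤ l.length)]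
  rw [pv_find_append pvQ _ rest pv_q_ne_nil pv_nl_not_in_q, if_neg hr]
  rw [if_neg hr]
  omega

theorem pv_nstep (l : List Char) (n : Int) (hn : n < 2) :
    (if PySem.Chars.isIn pvQ l && decide (n < 2) then n + (PySem.Chars.count l pvQ : Int)
     else n) = n + (PySem.Chars.count l pvQ : Int) := by
  rw [decide_eq_true hn]
  by_cases hf : PySem.Chars.find l pvQ = -1
  · have hi : PySem.Chars.isIn pvQ l = false := by
      simp [PySem.Chars.isIn, hf]
    have hc : PySem.Chars.count l pvQ = 0 := by
      rw [pv_count_eq_mcnt]; exact (pv_mcnt_zero_iff l).mpr hf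
    simp [hi, hc]
  · have hi : PySem.Chars.isIn pvQ l = true := by
      simp [PySem.Chars.isIn, hf]
    simp [hi]

theorem pv_main_single (cs : List Char) (n : Int) (hm : '\n' ∉ cs) (hn : n = 0 ∨ n = 1) :
    pvA (PySem.Chars.splitOn cs ['\n']) n = pvB cs n := by
  rw [pv_splitOn_single cs hm]
  have hA : pvA [cs] n = cs ++ ['\n'] := by
    simp only [pvA]
    rw [if_neg (by omega : ¬(n = 2))]
  rw [hA]
  unfold pvB
  by_cases hp : pvPos cs n = -1
  · rw [if_pos hp]
  · obtain ⟨h0, h3⟩ := pvPos_spec cs n hp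
    rw [if_neg hp]
    rw [pv_findFrom_eq cs ['\n'] _ h0 (by omega)]
    rw [pv_find_no_nl (cs.drop (pvPos cs n).toNat) (fun m => hm (List.drop_subset _ _ m))]
    rw [if_pos rfl, if_pos rfl]

theorem pv_mcnt_cast (l : List Char) : (PySem.Chars.count l pvQ : Int) = (pvMCnt l : Int) := by
  rw [pv_count_eq_mcnt]

theorem pv_pos_step (l rest : List Char) (hnl : '\n' ∉ l) (n : Int)
    (hn : n = 0 ∨ n = 1) (hge : ¬ 2 ≤ n + (PySem.Chars.count l pvQ : Int)) :
    pvPos (l ++ '\n' :: rest) n =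
      (if pvPos rest (n + (PySem.Chars.count l pvQ : Int)) = -1 then -1
       else (l.length : Int) + 1 + pvPos rest (n + (PySem.Chars.count l pvQ : Int))) := by
  have hcm := pv_mcnt_cast l
  rcases hn with hn0 | hn1
  · subst hn0
    by_cases hf : PySem.Chars.find l pvQ = -1
    · have hcz : (PySem.Chars.count l pvQ : Int) = 0 := by
        have := (pv_mcnt_zero_iff l).mpr hf; omega
      rw [show (0 : Int) + (PySem.Chars.count l pvQ : Int) = 0 from by omega]
      exact pv_pos_rec0a l rest hnl hf
    · have hmz : pvMCnt l ≠ 0 := fun h0 => hf ((pv_mcnt_zero_iff l).mp h0)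
      have hfn := PySem.Chars.neg_one_le_find (s := l) (sub := pvQ)
      have hmc := pv_mcnt_succ l (PySem.Chars.find l pvQ).toNat
        (by rw [Int.toNat_of_nonneg (by omega)])
      rw [show (PySem.Chars.find l pvQ).toNat + 3 =
        (PySem.Chars.find l pvQ + 3).toNat from by omega] at hmc
      have hr : PySem.Chars.find (l.drop (PySem.Chars.find l pvQ + 3).toNat) pvQ = -1 :=
        (pv_mcnt_zero_iff _).mp (by omega)
      rw [show (0 : Int) + (PySem.Chars.count l pvQ : Int) = 1 from by omega]
      exact pv_pos_rec0b l rest hnl hf hr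
  · subst hn1
    have hf : PySem.Chars.find l pvQ = -1 := (pv_mcnt_zero_iff l).mp (by omega)
    rw [show (1 : Int) + (PySem.Chars.count l pvQ : Int) = 1 from by omega]
    exact pv_pos_rec1 l rest hnl hf

theorem pv_B_hit_of_ge (l rest : List Char) (hnl : '\n' ∉ l) (n : Int)
    (hn : n = 0 ∨ n = 1) (hge : 2 ≤ n + (PySem.Chars.count l pvQ : Int)) :
    pvB (l ++ '\n' :: rest) n = l ++ ['\n'] := by
  have hcm := pv_mcnt_cast l
  rcases hn with hn0 | hn1
  · subst hn0
    have hp1 : PySem.Chars.find l pvQ ≠ -1 := fun hf => by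
      have := (pv_mcnt_zero_iff l).mpr hf; omega
    have hfn := PySem.Chars.neg_one_le_find (s := l) (sub := pvQ)
    have hmc := pv_mcnt_succ l (PySem.Chars.find l pvQ).toNat
      (by rw [Int.toNat_of_nonneg (by omega)])
    rw [show (PySem.Chars.find l pvQ).toNat + 3 =
      (PySem.Chars.find l pvQ + 3).toNat from by omega] at hmc
    have hr : PySem.Chars.find (l.drop (PySem.Chars.find l pvQ + 3).toNat) pvQ ≠ -1 :=
      fun hf => by
        have := (pv_mcnt_zero_iff _).mpr hf; omega
    obtain ⟨hh0, hhle⟩ := pv_pos_hit0 l rest hnl hp1 hr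
    exact pv_B_hit l rest hnl 0 hh0 hhle
  · subst hn1
    have hp1 : PySem.Chars.find l pvQ ≠ -1 := fun hf => by
      have := (pv_mcnt_zero_iff l).mpr hf; omega
    have hfn := PySem.Chars.neg_one_le_find (s := l) (sub := pvQ)
    have hlen3 := pv_find_add_len_le l pvQ (by omega)
    rw [show pvQ.length = 3 from rfl] at hlen3
    have hps := pv_pos_hit1 l rest hnl hp1
    exact pv_B_hit l rest hnl 1 (by rw [hps]; omega) (by rw [hps]; omega)

theorem pv_main_aux : ∀ (k : Nat) (cs : List Char) (n : Int), cs.length ≤ k →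
    (n = 0 ∨ n = 1) → ¬ pvDm (PySem.Chars.splitOn cs ['\n']) n →
    pvA (PySem.Chars.splitOn cs ['\n']) n = pvB cs n := by
  intro k
  induction k with
  | zero =>
    intro cs n hk hn hd
    have hcs : cs = [] := by
      cases cs with
      | nil => rfl
      | cons a b => simp at hk
    subst hcs
    exact pv_main_single [] n (by simp) hn
  | succ k ih =>
    intro cs n hk hn hd
    by_cases hm : '\n' ∈ cs
    · obtain ⟨l, rest, he, hnl⟩ := pv_split_at_nl cs hm
      subst he
      rw [pv_splitOn_cons l rest hnl] at hd ⊢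
      have hcm := pv_mcnt_cast l
      have hc0 : (0 : Int) ≤ (PySem.Chars.count l pvQ : Int) := by omega
      have hn2 : ¬ (n = 2) := by omega
      have hstep := pv_nstep l n (by omega)
      have hA : pvA (l :: PySem.Chars.splitOn rest ['\n']) n
          = l ++ '\n' :: pvA (PySem.Chars.splitOn rest ['\n'])
              (n + (PySem.Chars.count l pvQ : Int)) := by
        simp only [pvA]
        rw [hstep, if_neg hn2]
      have hDm : pvDm (l :: PySem.Chars.splitOn rest ['\n']) n =
          if 2 ≤ n + (PySem.Chars.count l pvQ : Int) then
            (2 < n + (PySem.Chars.count l pvQ : Int) ∧ PySem.Chars.splitOn rest ['\n'] ≠ [])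
          else pvDm (PySem.Chars.splitOn rest ['\n'])
            (n + (PySem.Chars.count l pvQ : Int)) := by
        simp only [pvDm]
      rw [hDm] at hd
      by_cases hge : 2 ≤ n + (PySem.Chars.count l pvQ : Int)
      · rw [if_pos hge] at hd
        have hls := pv_splitOn_ne_nil rest
        have heq : n + (PySem.Chars.count l pvQ : Int) = 2 := by
          by_contra hx
          exact hd ⟨by omega, hls⟩
        rw [hA, heq, pv_A_two, pv_B_hit_of_ge l rest hnl n hn hge]
      · rw [if_neg hge] at hd
        have hlen : rest.length ≤ k := by simp [List.length_append] at hk; omega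
        have hn' : n + (PySem.Chars.count l pvQ : Int) = 0 ∨
            n + (PySem.Chars.count l pvQ : Int) = 1 := by omega
        have hih := ih rest (n + (PySem.Chars.count l pvQ : Int)) hlen hn' hd
        rw [hA, hih]
        exact (pv_B_cons l rest hnl n _ (pv_pos_step l rest hnl n hn hge)).symm
    · exact pv_main_single cs n hm hn

theorem pv_main (cs : List Char) (n : Int) (hn : n = 0 ∨ n = 1)
    (hd : ¬ pvDm (PySem.Chars.splitOn cs ['\n']) n) :
    pvA (PySem.Chars.splitOn cs ['\n']) n = pvB cs n :=
  pv_main_aux cs.length cs n (Nat.le_refl _) hn hd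

theorem pv_Dm_iff (ls : List (List Char)) : ∀ (n : Int), 0 ≤ n → n < 2 →
    (pvDm ls n ↔ ∃ i, i < ls.length ∧
      (n + ((ls.take i).map (fun l => (PySem.Chars.count l pvQ : Int))).sum < 2 ∧
       2 < n + ((ls.take (i+1)).map (fun l => (PySem.Chars.count l pvQ : Int))).sum ∧
       i + 1 < ls.length)) := by
  induction ls with
  | nil => intro n h0 h2; simp [pvDm]
  | cons l ls ih =>
    intro n h0 h2
    have hC : (0 : Int) ≤ (PySem.Chars.count l pvQ : Int) := Int.natCast_nonneg _
    have hsum : ∀ m : Nat,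
        0 ≤ ((ls.take m).map (fun l => (PySem.Chars.count l pvQ : Int))).sum := by
      intro m
      apply List.sum_nonneg
      intro x hx
      obtain ⟨y, -, rfl⟩ := List.mem_map.mp hx
      exact Int.natCast_nonneg _
    simp only [pvDm]
    by_cases hge : 2 ≤ n + (PySem.Chars.count l pvQ : Int)
    · rw [if_pos hge]
      constructor
      · rintro ⟨hgt, hne⟩
        refine ⟨0, by simp, by simpa using h2, by simpa using hgt, ?_⟩
        have := List.length_pos_of_ne_nil hne
        simpa using this
      · rintro ⟨i, hi, hlt, hgt, hi1⟩
        cases i with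
        | zero =>
          refine ⟨by simpa using hgt, ?_⟩
          intro he
          rw [he] at hi1
          simp at hi1
        | succ j =>
          exfalso
          have := hsum j
          simp only [List.take_succ_cons, List.map_cons, List.sum_cons] at hlt
          omega
    · rw [if_neg hge]
      rw [ih (n + (PySem.Chars.count l pvQ : Int)) (by omega) (by omega)]
      constructor
      · rintro ⟨i, hi, hlt, hgt, hi1⟩
        refine ⟨i + 1, by simpa using hi, ?_, ?_, by simpa using hi1⟩
        · simp only [List.take_succ_cons, List.map_cons, List.sum_cons]
          omega
        · simp only [List.take_succ_cons, List.map_cons, List.sum_cons]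
          omega
      · rintro ⟨i, hi, hlt, hgt, hi1⟩
        cases i with
        | zero =>
          exfalso
          simp only [List.take_succ_cons, List.take_zero, List.map_cons, List.map_nil,
            List.sum_cons, List.sum_nil] at hgt
          omega
        | succ j =>
          refine ⟨j, by simp at hi1; omega, ?_, ?_, by simp at hi1 ⊢; omega⟩
          · simp only [List.take_succ_cons, List.map_cons, List.sum_cons] at hlt
            omega
          · simp only [List.take_succ_cons, List.map_cons, List.sum_cons] at hgt
            omega

theorem pv_D_iff (content : String) :
    D_proc_content content ↔ pvDm (PySem.Chars.splitOn content.toList ['\n']) 0 := by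
  unfold D_proc_content
  rw [pv_Dm_iff (PySem.Chars.splitOn content.toList ['\n']) 0 (le_refl 0) (by omega)]
  simp only [zero_add, show (['\"', '\"', '\"'] : List Char) = pvQ from rfl]
  have hT : ∀ j : Nat,
      (((PySem.Chars.splitOn content.toList ['\n']).take j).map
        (fun l => (PySem.Chars.count l pvQ : Int))).sum =
      ((((PySem.Chars.splitOn content.toList ['\n']).take j).map
        (PySem.Chars.count · pvQ)).sum : Int) := by
    intro j
    rw [Nat.cast_list_sum, List.map_map]
    rfl
  constructor
  · rintro ⟨i, hi, h1, h2⟩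
    exact ⟨i, by omega, by rw [hT]; exact_mod_cast h1, by rw [hT]; exact_mod_cast h2, by omega⟩
  · rintro ⟨i, hi, h1, h2, h3⟩
    rw [hT] at h1 h2
    exact ⟨i, by omega, by exact_mod_cast h1, by exact_mod_cast h2⟩

theorem pv_count_nil : (PySem.Chars.count ([] : List Char) pvQ : Int) = 0 := by
  rw [pv_count_eq_mcnt, pvMCnt_nil]
  rfl

theorem pv_diff_aux : ∀ (k : Nat) (cs : List Char) (n : Int), cs.length ≤ k →
    (n = 0 ∨ n = 1) → pvDm (PySem.Chars.splitOn cs ['\n']) n →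
    pvA (PySem.Chars.splitOn cs ['\n']) n = cs ++ ['\n'] ∧
      ∃ j : Nat, j < cs.length ∧ pvB cs n = cs.take j ++ ['\n'] := by
  intro k
  induction k with
  | zero =>
    intro cs n hk hn hd
    exfalso
    have hcs : cs = [] := by
      cases cs with
      | nil => rfl
      | cons a b => simp at hk
    subst hcs
    rw [pv_splitOn_single [] (by simp)] at hd
    simp only [pvDm] at hd
    rw [pv_count_nil] at hd
    split_ifs at hd with hx
    omega
  | succ k ih =>
    intro cs n hk hn hd
    by_cases hm : '\n' ∈ cs
    · obtain ⟨l, rest, he, hnl⟩ := pv_split_at_nl cs hm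
      subst he
      rw [pv_splitOn_cons l rest hnl] at hd ⊢
      have hcm := pv_mcnt_cast l
      have hn2 : ¬ (n = 2) := by omega
      have hstep := pv_nstep l n (by omega)
      have hA : pvA (l :: PySem.Chars.splitOn rest ['\n']) n
          = l ++ '\n' :: pvA (PySem.Chars.splitOn rest ['\n'])
              (n + (PySem.Chars.count l pvQ : Int)) := by
        simp only [pvA]
        rw [hstep, if_neg hn2]
      have hDm : pvDm (l :: PySem.Chars.splitOn rest ['\n']) n =
          if 2 ≤ n + (PySem.Chars.count l pvQ : Int) then
            (2 < n + (PySem.Chars.count l pvQ : Int) ∧ PySem.Chars.splitOn rest ['\n'] ≠ [])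
          else pvDm (PySem.Chars.splitOn rest ['\n'])
            (n + (PySem.Chars.count l pvQ : Int)) := by
        simp only [pvDm]
      rw [hDm] at hd
      by_cases hge : 2 ≤ n + (PySem.Chars.count l pvQ : Int)
      · rw [if_pos hge] at hd
        constructor
        · rw [hA, pv_A_big rest _ (by omega)]
          simp
        · refine ⟨l.length, by simp [List.length_append], ?_⟩
          rw [pv_B_hit_of_ge l rest hnl n hn hge]
          rw [List.take_append_of_le_length (Nat.le_refl _), List.take_length]
      · rw [if_neg hge] at hd
        have hlen : rest.length ≤ k := by simp [List.length_append] at hk; omega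
        have hn' : n + (PySem.Chars.count l pvQ : Int) = 0 ∨
            n + (PySem.Chars.count l pvQ : Int) = 1 := by omega
        obtain ⟨ihA, j', hj', ihB⟩ := ih rest (n + (PySem.Chars.count l pvQ : Int)) hlen hn' hd
        constructor
        · rw [hA, ihA]
          simp
        · refine ⟨l.length + 1 + j', by simp [List.length_append]; omega, ?_⟩
          rw [(pv_B_cons l rest hnl n _ (pv_pos_step l rest hnl n hn hge)), ihB]
          rw [show l ++ '\n' :: rest = (l ++ ['\n']) ++ rest from by simp]
          rw [show l.length + 1 + j' = (l ++ ['\n']).length + j' from by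
            simp [List.length_append]]
          rw [List.take_length_add_append]
          simp
    · exfalso
      rw [pv_splitOn_single cs hm] at hd
      simp only [pvDm] at hd
      split_ifs at hd with hx
      exact hd.2 rfl

theorem pv_diff (cs : List Char) (n : Int) (hn : n = 0 ∨ n = 1)
    (hd : pvDm (PySem.Chars.splitOn cs ['\n']) n) :
    pvA (PySem.Chars.splitOn cs ['\n']) n = cs ++ ['\n'] ∧
      ∃ j : Nat, j < cs.length ∧ pvB cs n = cs.take j ++ ['\n'] :=
  pv_diff_aux cs.length cs n (Nat.le_refl _) hn hd

theorem pv_procA_eq (cs : List Char) : pvProcA cs = pvA (PySem.Chars.splitOn cs ['\n']) 0 := by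
  unfold pvProcA
  rw [pv_foldA]
  simp

theorem pv_procB_eq (cs : List Char) : pvProcB cs = pvB cs 0 := by
  unfold pvProcB pvB pvPos
  simp only [show (0 : Int) ≠ 1 from by omega, if_false]
  by_cases h1 : PySem.Chars.find cs pvQ = -1
  · simp [h1]
  · simp only [h1, if_neg h1]
    by_cases h2 : PySem.Chars.findFrom cs pvQ (PySem.Chars.find cs pvQ + 3) none = -1
    · simp [h2]
    · simp only [h2, if_neg h2]
      have hp : pvPos cs 0 = PySem.Chars.findFrom cs pvQ (PySem.Chars.find cs pvQ + 3) none := by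
        unfold pvPos
        rw [if_neg (show (0 : Int) ≠ 1 from by omega), if_neg h1]
      have hspec := pvPos_spec cs 0 (by rw [hp]; exact h2)
      rw [hp] at hspec
      by_cases h3 : PySem.Chars.findFrom cs ['\n']
          (PySem.Chars.findFrom cs pvQ (PySem.Chars.find cs pvQ + 3) none) none = -1
      · simp [h3]
      · simp only [h3, if_neg h3]
        have h0 : 0 ≤ PySem.Chars.findFrom cs ['\n']
            (PySem.Chars.findFrom cs pvQ (PySem.Chars.find cs pvQ + 3) none) none := by
          rw [pv_findFrom_eq cs ['\n'] _ hspec.1 (by omega)] at h3 ⊢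
          by_cases h4 : PySem.Chars.find
              (cs.drop (PySem.Chars.findFrom cs pvQ (PySem.Chars.find cs pvQ + 3) none).toNat)
              ['\n'] = -1
          · exact absurd (if_pos h4) h3
          · have hr := PySem.Chars.neg_one_le_find
              (s := cs.drop
                (PySem.Chars.findFrom cs pvQ (PySem.Chars.find cs pvQ + 3) none).toNat)
              (sub := ['\n'])
            rw [if_neg h4]
            omega
        rw [PySem.Chars.slice_eq_listSlice, PySem.List.slice_to _ h0]
        simp only [if_false]
        rw [if_neg h2, if_neg h3]

-- ===== VERDICT (by name: the statement is the Claim_ definition above) =====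
theorem proc_content_spec : Claim_unchanged_proc_content := by
  intro content _ hd
  have h := pv_main content.toList 0 (Or.inl rfl) ((pv_D_iff content).not.mp hd)
  unfold proc_content proc_content_alt
  rw [pv_procA_eq, pv_procB_eq, h]

theorem proc_content_changed : Claim_changed_proc_content := by
  unfold Claim_changed_proc_content; decide

theorem proc_content_tight : Claim_exact_proc_content := by
  intro content _ hd
  have h := pv_diff content.toList 0 (Or.inl rfl) ((pv_D_iff content).mp hd)
  obtain ⟨ha, j, hj, hb⟩ := h
  unfold proc_content proc_content_alt
  rw [pv_procA_eq, pv_procB_eq, ha, hb]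
  intro hcontra
  have h2 : content.toList ++ ['\n'] = content.toList.take j ++ ['\n'] := by
    have := congrArg String.toList hcontra
    simpa using this
  have h3 : (content.toList ++ ['\n']).length = (content.toList.take j ++ ['\n']).length := by
    rw [h2]
  simp only [List.length_append, List.length_take, List.length_cons, List.length_nil] at h3
  omega
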